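-- pv_equiv track=rewrite | github.com/ZhongHY123/ParaGAN | paraGAN3D/models.py | calculateLayerList
-- ===== SOURCE A (Python) =====
-- import math
--
-- def calculateLayerList(x):
--     a = []
--     num=[3,2,1]
--     index =0
--     while x>0:
--         t = math.ceil(x/num[index])
--         for i in range(t):
--             a.append(num[index])
--         index = index+1
--         x = x-t
--     return a
-- ===== SOURCE B (Python) =====
-- def calculateLayerList(x):
--     # closed-form counts: the while loop always runs exactly min(3, needed) rounds,
--     # producing ceil(x/3) threes, ceil(floor(2x/3)/2) twos, floor(x/3) ones.
--     if x <= 0: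
--         return []
--     t0 = (x + 2) // 3
--     t1 = (2 * x // 3 + 1) // 2
--     t2 = x // 3
--     return [3] * t0 + [2] * t1 + [1] * t2
-- ===== Notes on version B (the rewrite author's own statement) =====
-- stated objective: simpler
-- what changed: Replaces the while/for append loops with three closed-form counts derived from x (ceil(x/3) threes, ceil(floor(2x/3)/2) twos, floor(x/3) ones) and list multiplication.
import Mathlib
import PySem

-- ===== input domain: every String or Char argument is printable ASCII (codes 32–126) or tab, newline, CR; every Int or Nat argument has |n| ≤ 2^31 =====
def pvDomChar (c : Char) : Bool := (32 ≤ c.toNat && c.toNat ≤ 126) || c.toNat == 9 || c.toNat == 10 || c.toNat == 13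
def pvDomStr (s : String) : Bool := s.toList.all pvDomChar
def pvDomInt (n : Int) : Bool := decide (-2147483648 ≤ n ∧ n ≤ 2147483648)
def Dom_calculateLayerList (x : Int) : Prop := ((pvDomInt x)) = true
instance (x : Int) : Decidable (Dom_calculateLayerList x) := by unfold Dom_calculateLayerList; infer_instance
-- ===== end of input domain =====

-- B replaces A's while/for append loops by three closed-form counts and list multiplication (objective: simpler).

-- ===== PORT A =====
-- while x>0 loop; fuel 4 only makes the loop total in Lean (the Python loop runs at most 3 iterations,
-- since with num[2]=1 the last step sets x to 0).  math.ceil(x/n) for positive int n is -((-x)//n), exact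
-- on |x| ≤ 2^31 (well below float precision loss).
def pvLoopA (fuel : Nat) (x : Int) (index : Int) (a : List Int) : List Int :=
  match fuel with
  | 0 => a
  | fuel + 1 =>
    if x > 0 then
      match PySem.List.pyGet? ([3, 2, 1] : List Int) index with
      | none => a   -- unreachable on the Python side (IndexError never occurs: x reaches 0 by index 2)
      | some n =>
        let t : Int := -(PySem.Int.floordiv (-x) n)   -- math.ceil(x/num[index])
        pvLoopA fuel (x - t) (index + 1) (a ++ List.replicate t.toNat n)  -- for i in range(t): a.append(...)
    else a

def calculateLayerList (x : Int) : List Int := pvLoopA 4 x 0 []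

-- ===== PORT B =====
def calculateLayerList_alt (x : Int) : List Int :=
  if x ≤ 0 then []
  else
    List.replicate (PySem.Int.floordiv (x + 2) 3).toNat 3 ++
    List.replicate (PySem.Int.floordiv (PySem.Int.floordiv (2 * x) 3 + 1) 2).toNat 2 ++
    List.replicate (PySem.Int.floordiv x 3).toNat 1

-- ===== PRECONDITION & SPEC =====
def Spec_calculateLayerList (x : Int) (out : List Int) : Prop := out = calculateLayerList_alt x
instance (x : Int) (out : List Int) : Decidable (Spec_calculateLayerList x out) := by unfold Spec_calculateLayerList; infer_instance

-- ===== CLAIM (what is proved, stated in full; the proofs are below) =====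
def Claim_equal_calculateLayerList : Prop := ∀ (x : Int), Dom_calculateLayerList x → Spec_calculateLayerList x (calculateLayerList x)

-- ===== LEMMAS AND PROOFS =====

theorem pvRepGlue (a b c d e f : Nat)
    (h1 : a = d) (h2 : b = e) (h3 : c = f) :
    List.replicate a (3:Int) ++ (List.replicate b 2 ++ List.replicate c 1) =
      List.replicate d (3:Int) ++ (List.replicate e 2 ++ List.replicate f 1) := by
  subst h1 h2 h3; rfl

theorem calculateLayerList_eq (x : Int) :
    calculateLayerList x = calculateLayerList_alt x := by
  by_cases hx : x ≤ 0
  · have hng : ¬ (x > 0) := by omega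
    simp [calculateLayerList, pvLoopA, calculateLayerList_alt, hx, hng]
  · push Not at hx
    have g0 : PySem.List.pyGet? ([3, 2, 1] : List Int) 0 = some 3 := by decide
    have g1 : PySem.List.pyGet? ([3, 2, 1] : List Int) (0 + 1) = some 2 := by decide
    have g2 : PySem.List.pyGet? ([3, 2, 1] : List Int) (0 + 1 + 1) = some 1 := by decide
    have hfd3 : ∀ a : Int, PySem.Int.floordiv a 3 = a / 3 :=
      fun a => PySem.Int.floordiv_eq_ediv_of_pos (by norm_num)
    have hfd2 : ∀ a : Int, PySem.Int.floordiv a 2 = a / 2 :=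
      fun a => PySem.Int.floordiv_eq_ediv_of_pos (by norm_num)
    have hfd1 : ∀ a : Int, PySem.Int.floordiv a 1 = a :=
      fun a => by rw [PySem.Int.floordiv_eq_ediv_of_pos (by norm_num)]; exact Int.ediv_one a
    have hxle : ¬ x ≤ 0 := by omega
    simp only [calculateLayerList, calculateLayerList_alt, pvLoopA, g0, g1, g2,
      hfd3, hfd2, hfd1, hx, if_pos, hxle, if_false,
      List.nil_append, List.append_assoc, neg_neg, sub_self]
    split_ifs with h1 h2 h3
    · -- x2 - x2 > 0 : impossible
      omega
    · -- all three rounds run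
      exact pvRepGlue _ _ _ _ _ _ (by omega) (by omega) (by omega)
    · -- second round skipped after: x2 ≤ 0, i.e. x ∈ {2,3}
      have : x = 2 := by omega
      subst this; decide
    · -- first remainder already ≤ 0 : x = 1
      have : x = 1 := by omega
      subst this; decide

-- ===== VERDICT (by name: the statement is the Claim_ definition above) =====
theorem calculateLayerList_spec : Claim_equal_calculateLayerList := by
  intro x _
  unfold Spec_calculateLayerList
  exact calculateLayerList_eq x
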